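-- pv_equiv track=rewrite | github.com/CaldeCrack/Advent-of-Code | 2025/10.py | solve
-- ===== SOURCE A (Python) =====
-- from functools import cache
--
-- def solve(l, b):
--   l = sum(j << c for c, j in enumerate(l))
--   b = [sum((1 << j) for j in i) for i in b]
--
--   @cache
--   def rsolve(l, idx=0):
--     if l == 0: return 0
--     if idx == len(b): return len(b) + 1
--     return min(rsolve(l, idx + 1), 1 + rsolve(l ^ b[idx], idx + 1))
--   return rsolve(l)
-- ===== SOURCE B (Python) =====
-- def solve(l, b):
--   target = sum(j << c for c, j in enumerate(l))
--   masks = [sum((1 << j) for j in i) for i in b]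
--   # forward DP over xor-values: reach maps xor value -> min number of masks used
--   reach = {0: 0}
--   for m in masks:
--     nxt = dict(reach)
--     for v, c in reach.items():
--       nv, nc = v ^ m, c + 1
--       cur = nxt.get(nv)
--       if cur is None or cur > nc:
--         nxt[nv] = nc
--     reach = nxt
--   return reach.get(target, len(b) + 1)
-- ===== Notes on version B (the rewrite author's own statement) =====
-- stated objective: alternative
-- what changed: The memoized top-down include/exclude recursion over (xor value, index) is replaced by an iterative forward DP keeping one dict from xor value to minimum number of masks used, updated once per mask; the index dimension disappears and states are merged by value.
import Mathlib
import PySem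

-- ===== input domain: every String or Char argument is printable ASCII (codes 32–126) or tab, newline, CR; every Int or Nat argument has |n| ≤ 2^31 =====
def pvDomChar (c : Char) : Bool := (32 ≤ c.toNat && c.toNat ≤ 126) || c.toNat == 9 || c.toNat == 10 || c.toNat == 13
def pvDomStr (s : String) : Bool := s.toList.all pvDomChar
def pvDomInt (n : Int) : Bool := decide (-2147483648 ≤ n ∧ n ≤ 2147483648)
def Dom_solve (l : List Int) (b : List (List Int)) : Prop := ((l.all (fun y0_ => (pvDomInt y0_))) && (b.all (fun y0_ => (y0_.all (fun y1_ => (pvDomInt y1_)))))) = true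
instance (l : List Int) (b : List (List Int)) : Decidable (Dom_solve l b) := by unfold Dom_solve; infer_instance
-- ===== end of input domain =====

-- B replaces A's memoized include/exclude recursion over (xor, index) by an iterative forward DP on a
-- single dict from xor value to minimum count (objective: alternative decomposition, similar cost).

-- ===== PORT A =====
-- l = sum(j << c for c, j in enumerate(l))
def pyTargetA (l : List Int) : Int :=
  (PySem.List.enumerate l 0).foldl (fun s p => s + (p.2 <<< p.1.toNat)) 0

-- sum((1 << j) for j in i)   (Python raises ValueError on j < 0; excluded by Pre_solve)
def pyMaskA (i : List Int) : Int :=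
  i.foldl (fun s j => s + ((1 : Int) <<< j.toNat)) 0

-- rsolve(l, idx): recursion over the suffix b[idx:], base = len(b) + 1
def rsolveA (base : Int) : List Int → Int → Int
  | [], n => if n = 0 then 0 else base
  | m :: rs, n =>
      if n = 0 then 0
      else min (rsolveA base rs n) (1 + rsolveA base rs (PySem.Int.bxor n m))

def solve (l : List Int) (b : List (List Int)) : Int :=
  let t := pyTargetA l
  let masks := b.map pyMaskA
  rsolveA ((masks.length : Int) + 1) masks t

-- ===== PORT B =====
def pyTargetB (l : List Int) : Int :=
  (PySem.List.enumerate l 0).foldl (fun s p => s + (p.2 <<< p.1.toNat)) 0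

def pyMaskB (i : List Int) : Int :=
  i.foldl (fun s j => s + ((1 : Int) <<< j.toNat)) 0

-- one iteration of the inner 'for v, c in reach.items()' loop body
def stepItemB (m : Int) (nxt : PySem.Dict Int Int) (p : Int × Int) : PySem.Dict Int Int :=
  match nxt.get? (PySem.Int.bxor p.1 m) with
  | none => nxt.insert (PySem.Int.bxor p.1 m) (p.2 + 1)
  | some cur => if cur > p.2 + 1 then nxt.insert (PySem.Int.bxor p.1 m) (p.2 + 1) else nxt

-- one iteration of the outer 'for m in masks' loop: nxt = dict(reach); inner loop; reach = nxt
def stepMaskB (reach : PySem.Dict Int Int) (m : Int) : PySem.Dict Int Int :=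
  reach.items.foldl (stepItemB m) reach

def solve_alt (l : List Int) (b : List (List Int)) : Int :=
  let t := pyTargetB l
  let masks := b.map pyMaskB
  let reach := masks.foldl stepMaskB (PySem.Dict.ofList [((0 : Int), (0 : Int))])
  reach.getD t ((b.length : Int) + 1)

-- ===== PRECONDITION & SPEC =====
-- Pre_solve excludes exactly the inputs where Python A raises ValueError: a negative j in a row of b
-- makes '1 << j' raise (B's Python raises there too).
def Pre_solve (l : List Int) (b : List (List Int)) : Prop :=
  ∀ i ∈ b, ∀ j ∈ i, 0 ≤ j
instance (l : List Int) (b : List (List Int)) : Decidable (Pre_solve l b) := by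
  unfold Pre_solve; infer_instance

def pvWitness_solve : List Int × List (List Int) := ([1, 0, 1], [[0], [1, 2], [0, 1, 2]])

def Spec_solve (l : List Int) (b : List (List Int)) (out : Int) : Prop := out = solve_alt l b
instance (l : List Int) (b : List (List Int)) (out : Int) : Decidable (Spec_solve l b out) := by
  unfold Spec_solve; infer_instance

-- ===== CLAIM (what is proved, stated in full; the proofs are below) =====
def Claim_equal_solve : Prop := ∀ (l : List Int) (b : List (List Int)), Dom_solve l b → Pre_solve l b → Spec_solve l b (solve l b)

-- ===== LEMMAS AND PROOFS =====

-- minimum of two optional costs (none = unreachable)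
def omin : Option Int → Option Int → Option Int
  | none, o => o
  | some a, none => some a
  | some a, some b => some (min a b)

-- specification: minimum size of a subset of ms with xor = v (none = no such subset)
def best : Int → List Int → Option Int
  | v, [] => if v = 0 then some 0 else none
  | v, m :: ms => omin (best v ms) ((best (PySem.Int.bxor v m) ms).map (· + 1))

theorem bxor_eq_xor (a b : Int) : PySem.Int.bxor a b = Int.xor a b := by
  cases a with
  | ofNat p =>
    cases b with
    | ofNat q => simp [PySem.Int.bxor, Int.xor]
    | negSucc q =>
      simp [PySem.Int.bxor, Int.xor, Int.negSucc_eq]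
      omega
  | negSucc p =>
    cases b with
    | ofNat q =>
      simp [PySem.Int.bxor, Int.xor, Int.negSucc_eq]
      omega
    | negSucc q =>
      simp [PySem.Int.bxor, Int.xor, Int.negSucc_eq]
      omega

theorem xor_assoc (a b c : Int) : Int.xor (Int.xor a b) c = Int.xor a (Int.xor b c) := by
  cases a <;> cases b <;> cases c <;> simp [Int.xor, Nat.xor_assoc]

theorem xor_self' (a : Int) : Int.xor a a = 0 := by
  cases a <;> simp [Int.xor]

theorem xor_zero' (a : Int) : Int.xor a 0 = a := by
  cases a <;> simp [Int.xor]

theorem xor_comm' (a b : Int) : Int.xor a b = Int.xor b a := by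
  cases a <;> cases b <;> simp [Int.xor, Nat.xor_comm]

theorem bxor_cancel (a m : Int) : PySem.Int.bxor (PySem.Int.bxor a m) m = a := by
  simp [bxor_eq_xor, xor_assoc, xor_self', xor_zero']

theorem bxor_swap (v a m : Int) :
    PySem.Int.bxor (PySem.Int.bxor v a) m = PySem.Int.bxor (PySem.Int.bxor v m) a := by
  simp [bxor_eq_xor, xor_assoc, xor_comm' a m]

theorem bxor_right_inj {a b m : Int} (h : PySem.Int.bxor a m = PySem.Int.bxor b m) : a = b := by
  have := congrArg (fun x => PySem.Int.bxor x m) h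
  simpa [bxor_cancel] using this

theorem omin_comm (o o' : Option Int) : omin o o' = omin o' o := by
  cases o <;> cases o' <;> simp [omin, min_comm]

theorem omin_assoc (a b c : Option Int) : omin (omin a b) c = omin a (omin b c) := by
  cases a <;> cases b <;> cases c <;> simp [omin, min_assoc]

theorem omin_map_add (a b : Option Int) :
    (omin a b).map (· + 1) = omin (a.map (· + 1)) (b.map (· + 1)) := by
  cases a <;> cases b <;> simp [omin, min_add_add_right]

theorem best_bounds (ms : List Int) : ∀ (v k : Int), best v ms = some k →
    0 ≤ k ∧ k ≤ (ms.length : Int) := by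
  induction ms with
  | nil =>
    intro v k h
    by_cases hv : v = 0 <;> simp [best, hv] at h
    omega
  | cons m ms ih =>
    intro v k h
    simp only [best] at h
    rcases h1 : best v ms with _ | k1 <;> rcases h2 : best (PySem.Int.bxor v m) ms with _ | k2 <;>
        rw [h1, h2] at h
    · simp [omin] at h
    · simp [omin] at h
      have := ih _ _ h2
      simp only [List.length_cons]
      omega
    · simp [omin] at h
      have := ih _ _ h1
      simp only [List.length_cons]
      omega
    · simp [omin] at h
      have b1 := ih _ _ h1
      have b2 := ih _ _ h2
      simp only [List.length_cons]
      omega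

theorem best_zero (ms : List Int) : best 0 ms = some 0 := by
  induction ms with
  | nil => simp [best]
  | cons m ms ih =>
    simp only [best, ih]
    rcases h2 : best (PySem.Int.bxor 0 m) ms with _ | k2
    · rfl
    · have := best_bounds ms _ _ h2
      simp [omin]
      omega

theorem rsolveA_eq_best (ms : List Int) (base : Int) (hb : 0 ≤ base) : ∀ (n : Int),
    rsolveA base ms n = match best n ms with | none => base | some k => min k base := by
  induction ms with
  | nil =>
    intro n
    by_cases hn : n = 0 <;> simp [rsolveA, best, hn]
    omega
  | cons m ms ih =>
    intro n
    by_cases hn : n = 0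
    · simp [rsolveA, hn, best_zero]
      omega
    · simp only [rsolveA, if_neg hn, ih, best]
      cases h1 : best n ms with
      | none =>
        cases h2 : best (PySem.Int.bxor n m) ms with
        | none => show min base (1 + base) = base; omega
        | some k2 => show min base (1 + min k2 base) = min (k2 + 1) base; omega
      | some k1 =>
        cases h2 : best (PySem.Int.bxor n m) ms with
        | none => show min (min k1 base) (1 + base) = min k1 base; omega
        | some k2 => show min (min k1 base) (1 + min k2 base) = min (min k1 (k2 + 1)) base; omega

theorem best_append (ms : List Int) (m : Int) : ∀ (v : Int),
    best v (ms ++ [m]) = omin (best v ms) ((best (PySem.Int.bxor v m) ms).map (· + 1)) := by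
  induction ms with
  | nil => intro v; rfl
  | cons a ms ih =>
    intro v
    simp only [List.cons_append, best, ih, omin_map_add, bxor_swap v a m]
    rw [omin_assoc, omin_assoc]
    congr 1
    rw [← omin_assoc, ← omin_assoc, omin_comm ((best (PySem.Int.bxor v m) ms).map (· + 1))]

theorem stepItemB_get?_of_ne (m : Int) (d : PySem.Dict Int Int) (p : Int × Int) (k : Int)
    (hk : k ≠ PySem.Int.bxor p.1 m) : (stepItemB m d p).get? k = d.get? k := by
  unfold stepItemB
  cases h : d.get? (PySem.Int.bxor p.1 m) with
  | none => dsimp only; rw [PySem.Dict.get?_insert, if_neg hk]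
  | some cur =>
    dsimp only
    by_cases hc : cur > p.2 + 1
    · rw [if_pos hc, PySem.Dict.get?_insert, if_neg hk]
    · rw [if_neg hc]

theorem stepItemB_get?_self (m : Int) (d : PySem.Dict Int Int) (p : Int × Int) :
    (stepItemB m d p).get? (PySem.Int.bxor p.1 m) =
      omin (d.get? (PySem.Int.bxor p.1 m)) (some (p.2 + 1)) := by
  unfold stepItemB
  cases h : d.get? (PySem.Int.bxor p.1 m) with
  | none => dsimp only; rw [PySem.Dict.get?_insert_self]; rfl
  | some cur =>
    dsimp only
    by_cases hc : cur > p.2 + 1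
    · rw [if_pos hc, PySem.Dict.get?_insert_self]
      simp [omin]
      omega
    · rw [if_neg hc, h]
      simp [omin]
      omega

theorem inner_loop (m : Int) (its : List (Int × Int)) : ∀ (d : PySem.Dict Int Int),
    (its.map (·.1)).Nodup → ∀ (k : Int),
    (its.foldl (stepItemB m) d).get? k =
      match its.find? (fun p => PySem.Int.bxor p.1 m == k) with
      | none => d.get? k
      | some p => omin (d.get? k) (some (p.2 + 1)) := by
  induction its with
  | nil => intro d _ k; rfl
  | cons p rest ih =>
    intro d hnd k
    have hnd' : (rest.map (·.1)).Nodup := (List.nodup_cons.mp hnd).2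
    have hpn : p.1 ∉ rest.map (·.1) := (List.nodup_cons.mp hnd).1
    rw [List.foldl_cons]
    by_cases hp : PySem.Int.bxor p.1 m = k
    · -- p is the unique item hitting k
      have hrest : rest.find? (fun q => PySem.Int.bxor q.1 m == k) = none := by
        rw [List.find?_eq_none]
        intro q hq
        simp only [beq_iff_eq]
        intro hqk
        have hq1 : q.1 = p.1 := bxor_right_inj (hqk.trans hp.symm)
        exact hpn (List.mem_map.mpr ⟨q, hq, hq1⟩)
      rw [ih _ hnd', hrest]
      simp only [List.find?_cons, show (PySem.Int.bxor p.1 m == k) = true by simpa using hp]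
      rw [← hp, stepItemB_get?_self]
    · have hke : k ≠ PySem.Int.bxor p.1 m := fun h => hp h.symm
      have hd' := stepItemB_get?_of_ne m d p k hke
      rw [ih _ hnd']
      simp only [List.find?_cons, show (PySem.Int.bxor p.1 m == k) = false by simpa using hp]
      cases hfind : rest.find? (fun q => PySem.Int.bxor q.1 m == k) with
      | none => exact hd'
      | some q => rw [hd']

theorem get?_as_find? (d : PySem.Dict Int Int) (x : Int) :
    d.items.find? (fun p => p.1 == x) = (d.get? x).map (fun v => (x, v)) := by
  show d.items.find? (fun p => p.1 == x) =
    (Option.map (fun p => p.2) (d.items.find? (fun p => p.1 == x))).map (fun v => (x, v))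
  cases hf : d.items.find? (fun p => p.1 == x) with
  | none => rfl
  | some p =>
    have := List.find?_some hf
    simp only [beq_iff_eq] at this
    simp [← this]

theorem stepMaskB_get? (reach : PySem.Dict Int Int) (m : Int) (hnd : reach.keys.Nodup) (k : Int) :
    (stepMaskB reach m).get? k =
      omin (reach.get? k) ((reach.get? (PySem.Int.bxor k m)).map (· + 1)) := by
  unfold stepMaskB
  rw [inner_loop m reach.items reach hnd k]
  have hpred : (fun p : Int × Int => PySem.Int.bxor p.1 m == k) =
      (fun p : Int × Int => p.1 == PySem.Int.bxor k m) := by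
    funext p
    by_cases h : p.1 = PySem.Int.bxor k m
    · have h2 : PySem.Int.bxor p.1 m = k := by rw [h, bxor_cancel]
      simp [h, bxor_cancel]
    · have h2 : PySem.Int.bxor p.1 m ≠ k := fun hc => h (by rw [← hc, bxor_cancel])
      simp [h, h2]
  rw [hpred, get?_as_find? reach (PySem.Int.bxor k m)]
  cases h : reach.get? (PySem.Int.bxor k m) with
  | none => cases reach.get? k <;> rfl
  | some c => rfl

theorem nodup_keys_stepItemB (m : Int) (d : PySem.Dict Int Int) (p : Int × Int)
    (h : d.keys.Nodup) : (stepItemB m d p).keys.Nodup := by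
  unfold stepItemB
  cases hd : d.get? (PySem.Int.bxor p.1 m) with
  | none => dsimp only; exact PySem.Dict.nodup_keys_insert _ _ _ h
  | some cur =>
    dsimp only
    by_cases hc : cur > p.2 + 1
    · rw [if_pos hc]; exact PySem.Dict.nodup_keys_insert _ _ _ h
    · rw [if_neg hc]; exact h

theorem nodup_keys_inner (m : Int) (its : List (Int × Int)) : ∀ (d : PySem.Dict Int Int),
    d.keys.Nodup → (its.foldl (stepItemB m) d).keys.Nodup := by
  induction its with
  | nil => intro d h; exact h
  | cons p rest ih => intro d h; exact ih _ (nodup_keys_stepItemB m d p h)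

theorem nodup_keys_stepMaskB (reach : PySem.Dict Int Int) (m : Int) (h : reach.keys.Nodup) :
    (stepMaskB reach m).keys.Nodup := nodup_keys_inner m reach.items reach h

theorem init_get? (k : Int) :
    (PySem.Dict.ofList [((0 : Int), (0 : Int))]).get? k = if k = 0 then some 0 else none := by
  by_cases hk : k = 0 <;> simp [PySem.Dict.get?, PySem.Dict.ofList, PySem.Dict.empty,
    PySem.Dict.update, PySem.Dict.insert, hk]
  omega

theorem reach_invariant (ms : List Int) :
    (ms.foldl stepMaskB (PySem.Dict.ofList [((0 : Int), (0 : Int))])).keys.Nodup ∧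
    ∀ k, (ms.foldl stepMaskB (PySem.Dict.ofList [((0 : Int), (0 : Int))])).get? k = best k ms := by
  induction ms using List.reverseRecOn with
  | nil =>
    refine ⟨by decide, fun k => ?_⟩
    rw [List.foldl_nil, init_get?]
    rfl
  | append_singleton ms m ih =>
    rw [List.foldl_append, List.foldl_cons, List.foldl_nil]
    refine ⟨nodup_keys_stepMaskB _ m ih.1, fun k => ?_⟩
    rw [stepMaskB_get? _ m ih.1 k, ih.2 k, ih.2 (PySem.Int.bxor k m), best_append]

-- ===== VERDICT (by name: the statement is the Claim_ definition above) =====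
theorem solve_spec : Claim_equal_solve := by
  intro l b _ _
  unfold Spec_solve solve solve_alt
  have hmask : pyMaskB = pyMaskA := rfl
  have htgt : pyTargetB = pyTargetA := rfl
  rw [hmask, htgt]
  set t := pyTargetA l
  set masks := b.map pyMaskA with hmasks
  have hlen : (masks.length : Int) = (b.length : Int) := by rw [hmasks, List.length_map]
  rw [rsolveA_eq_best masks ((masks.length : Int) + 1) (by positivity) t]
  rw [PySem.Dict.getD_eq_get?_getD, (reach_invariant masks).2 t]
  cases hb : best t masks with
  | none => simp [hlen]
  | some k =>
    have := best_bounds masks t k hb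
    simp only [Option.getD_some]
    rw [hlen] at this ⊢
    rw [min_eq_left (by omega)]
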